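-- pv_equiv track=rewrite | github.com/dipseth/google_workspace_fastmcp2 | research/trm/poc/games/connect4.py | _vertical_streak
-- ===== SOURCE A (Python) =====
-- ROWS = 6
--
-- def _vertical_streak(board: tuple, col: int) -> tuple[int, int]:
--     """Return (player, streak_length) for the top streak in a column."""
--     for r in range(ROWS):
--         if board[r][col] != 0:
--             player = board[r][col]
--             streak = 0
--             while r + streak < ROWS and board[r + streak][col] == player:
--                 streak += 1
--             return player, streak
--     return 0, 0
-- ===== SOURCE B (Python) =====
-- ROWS = 6
--
-- def _vertical_streak(board: tuple, col: int) -> tuple[int, int]: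
--     """Return (player, streak_length) for the top streak in a column."""
--     player = 0
--     streak = 0
--     for r in range(ROWS):
--         v = board[r][col]
--         if player == 0:
--             if v != 0:
--                 player = v
--                 streak = 1
--         elif v == player:
--             streak += 1
--         else:
--             break
--     return player, streak
-- ===== Notes on version B (the rewrite author's own statement) =====
-- stated objective: alternative
-- what changed: B is a single stateful pass over the column (a state machine that skips the leading zero run, then counts the streak and breaks when it ends) instead of A's two-phase find-first-nonzero loop followed by a separate while-count that re-indexes from the found row.
import Mathlib
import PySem

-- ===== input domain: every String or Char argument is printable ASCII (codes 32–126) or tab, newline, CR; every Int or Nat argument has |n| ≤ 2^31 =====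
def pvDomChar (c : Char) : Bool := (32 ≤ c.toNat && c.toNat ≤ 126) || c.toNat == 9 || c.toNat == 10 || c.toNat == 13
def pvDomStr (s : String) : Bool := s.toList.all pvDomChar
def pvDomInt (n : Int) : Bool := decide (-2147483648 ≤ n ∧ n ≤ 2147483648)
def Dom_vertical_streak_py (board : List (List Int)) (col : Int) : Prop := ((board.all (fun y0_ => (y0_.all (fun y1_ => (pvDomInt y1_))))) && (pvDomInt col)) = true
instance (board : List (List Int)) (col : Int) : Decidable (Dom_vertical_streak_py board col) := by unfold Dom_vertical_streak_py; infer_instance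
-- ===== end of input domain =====

-- B replaces A's find-first-nonzero loop + separate while-count with a single stateful pass over the rows (skip leading zeros, count the streak, break when it ends); return values proved equal on Pre_ (exactly the inputs where Python A returns without IndexError).


-- ===== PORT A =====
-- board[r][col] (negative col wraps); total form with default 0, exact under Pre_ below
def aCell (board : List (List Int)) (col : Int) (r : Nat) : Int :=
  (PySem.List.pyGet? ((PySem.List.pyGet? board (r : Int)).getD []) col).getD 0

-- 'while r + streak < ROWS and board[r + streak][col] == player: streak += 1'
def aCount (board : List (List Int)) (col player : Int) (idx : Nat) : Int :=
  if idx < 6 then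
    if aCell board col idx == player then 1 + aCount board col player (idx + 1) else 0
  else 0
termination_by 6 - idx

-- 'for r in range(ROWS): if board[r][col] != 0: …'
def aFind (board : List (List Int)) (col : Int) (idx : Nat) : Int × Int :=
  if idx < 6 then
    let v := aCell board col idx
    if v ≠ 0 then (v, aCount board col v idx) else aFind board col (idx + 1)
  else (0, 0)
termination_by 6 - idx

def vertical_streak_py (board : List (List Int)) (col : Int) : Int × Int :=
  aFind board col 0

-- ===== PORT B =====
-- B's per-row read v = board[r][col]; total form with default 0, exact under Pre_ below
def bCell (board : List (List Int)) (col : Int) (r : Nat) : Int :=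
  (PySem.List.pyGet? ((PySem.List.pyGet? board (r : Int)).getD []) col).getD 0

-- B's 'for r in range(ROWS)' state machine with break
def bLoop (board : List (List Int)) (col : Int) : List Nat → Int → Int → Int × Int
  | [], player, streak => (player, streak)
  | r :: rest, player, streak =>
    let v := bCell board col r
    if player == 0 then
      if v ≠ 0 then bLoop board col rest v 1 else bLoop board col rest 0 0
    else if v == player then bLoop board col rest player (streak + 1)
    else (player, streak)

def vertical_streak_py_alt (board : List (List Int)) (col : Int) : Int × Int :=
  bLoop board col (List.range 6) 0 0

-- ===== PRECONDITION & SPEC =====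
-- cell value and in-bounds test used only by Pre_ (kept separate from the ports)
def pvCellP (board : List (List Int)) (col : Int) (r : Nat) : Int :=
  (PySem.List.pyGet? ((PySem.List.pyGet? board (r : Int)).getD []) col).getD 0
def pvOkP (board : List (List Int)) (col : Int) (r : Nat) : Bool :=
  ((PySem.List.pyGet? board (r : Int)).bind (fun row => PySem.List.pyGet? row col)).isSome
-- row r is read iff the cells above it are a run of zeros, or a run of zeros followed by a
-- still-unbroken run of one nonzero player
def pvGuardP (board : List (List Int)) (col : Int) (r : Nat) : Bool :=
  ((List.range r).all (fun j => pvCellP board col j == 0)) ||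
  ((List.range r).any (fun k =>
    ((List.range k).all (fun j => pvCellP board col j == 0)) &&
    (pvCellP board col k != 0) &&
    ((List.range' k (r - k)).all (fun j => pvCellP board col j == pvCellP board col k))))

-- Pre_ holds exactly when every row the Python actually reads exists and has col in range
-- (otherwise Python raises IndexError; both A and B read the same rows).
def Pre_vertical_streak_py (board : List (List Int)) (col : Int) : Prop :=
  ∀ r < 6, pvGuardP board col r = true → pvOkP board col r = true
instance (board : List (List Int)) (col : Int) : Decidable (Pre_vertical_streak_py board col) := by
  unfold Pre_vertical_streak_py; infer_instance

def pvWitness_vertical_streak_py : List (List Int) × Int :=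
  ([[0], [1], [1], [2], [0], [0]], 0)

def Spec_vertical_streak_py (board : List (List Int)) (col : Int) (out : Int × Int) : Prop :=
  out = vertical_streak_py_alt board col
instance (board : List (List Int)) (col : Int) (out : Int × Int) : Decidable (Spec_vertical_streak_py board col out) := by
  unfold Spec_vertical_streak_py; infer_instance

-- ===== CLAIM (what is proved, stated in full; the proofs are below) =====
def Claim_equal_vertical_streak_py : Prop := ∀ (board : List (List Int)) (col : Int), Dom_vertical_streak_py board col → Pre_vertical_streak_py board col → Spec_vertical_streak_py board col (vertical_streak_py board col)

-- ===== LEMMAS AND PROOFS =====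

-- the row indices B still has to visit, starting at idx
def idxTail (idx : Nat) : List Nat := List.range' idx (6 - idx)

theorem aCell_eq_bCell (board : List (List Int)) (col : Int) (r : Nat) :
    aCell board col r = bCell board col r := rfl

theorem idxTail_cons (idx : Nat) (h : idx < 6) :
    idxTail idx = idx :: idxTail (idx + 1) := by
  unfold idxTail
  have : 6 - idx = (6 - (idx + 1)) + 1 := by omega
  rw [this, List.range'_succ]

theorem idxTail_nil (idx : Nat) (h : ¬ idx < 6) : idxTail idx = [] := by
  unfold idxTail
  have : 6 - idx = 0 := by omega
  simp [this]

theorem bLoop_cons_zero (board : List (List Int)) (col : Int) (r : Nat) (rest : List Nat) :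
    bLoop board col (r :: rest) 0 0 =
      if bCell board col r ≠ 0 then bLoop board col rest (bCell board col r) 1
      else bLoop board col rest 0 0 := by
  simp [bLoop]

theorem bLoop_cons_ne (board : List (List Int)) (col : Int) (r : Nat) (rest : List Nat)
    (player s : Int) (hp : player ≠ 0) :
    bLoop board col (r :: rest) player s =
      if bCell board col r = player then bLoop board col rest player (s + 1) else (player, s) := by
  simp [bLoop, hp]

-- counting mode: once player ≠ 0, B's loop adds the leading run of player to streak,
-- which is exactly what A's while-count computes.
theorem bLoop_count (board : List (List Int)) (col player : Int) (hp : player ≠ 0)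
    (idx : Nat) (s : Int) :
    bLoop board col (idxTail idx) player s = (player, s + aCount board col player idx) := by
  induction' hlt : 6 - idx with n ih generalizing idx s
  · rw [idxTail_nil idx (by omega)]
    unfold aCount
    simp [bLoop, show ¬ idx < 6 by omega]
  · rw [idxTail_cons idx (by omega)]
    have ha : aCount board col player idx =
        if aCell board col idx == player then 1 + aCount board col player (idx + 1) else 0 := by
      rw [aCount, if_pos (by omega : idx < 6)]
    rw [bLoop_cons_ne _ _ _ _ _ _ hp]
    by_cases hc : bCell board col idx = player
    · rw [if_pos hc, ih (idx + 1) (s + 1) (by omega), ha,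
        if_pos (show (aCell board col idx == player) = true by simpa [aCell_eq_bCell])]
      rw [add_assoc]
    · rw [if_neg hc, ha,
        if_neg (show ¬ (aCell board col idx == player) = true by simpa [aCell_eq_bCell])]
      simp

theorem find_eq (board : List (List Int)) (col : Int) (idx : Nat) :
    aFind board col idx = bLoop board col (idxTail idx) 0 0 := by
  induction' hlt : 6 - idx with n ih generalizing idx
  · rw [idxTail_nil idx (by omega)]
    unfold aFind
    simp [bLoop, show ¬ idx < 6 by omega]
  · rw [idxTail_cons idx (by omega)]
    rw [aFind, if_pos (by omega : idx < 6), bLoop_cons_zero]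
    by_cases hv : aCell board col idx = 0
    · rw [if_neg (by simpa using hv), if_neg (by simpa [← aCell_eq_bCell] using hv)]
      exact ih (idx + 1) (by omega)
    · rw [if_pos (by simpa using hv), if_pos (by simpa [← aCell_eq_bCell] using hv)]
      rw [bLoop_count board col _ (by simpa [← aCell_eq_bCell] using hv) (idx + 1) 1]
      rw [show aCount board col (aCell board col idx) idx
            = 1 + aCount board col (aCell board col idx) (idx + 1) from by
        rw [aCount, if_pos (by omega : idx < 6), if_pos (by simp [aCell_eq_bCell])]]
      rfl

theorem range_eq_idxTail : List.range 6 = idxTail 0 := by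
  unfold idxTail
  rw [List.range_eq_range']

-- ===== VERDICT (by name: the statement is the Claim_ definition above) =====
theorem vertical_streak_py_spec : Claim_equal_vertical_streak_py := by
  intro board col _ _
  unfold Spec_vertical_streak_py vertical_streak_py vertical_streak_py_alt
  rw [range_eq_idxTail, find_eq]
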